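-- pv_equiv track=rewrite | github.com/chickengak/TIL | 프로그래머스/unrated/120907. OX퀴즈/OX퀴즈.py | solution
-- ===== SOURCE A (Python) =====
-- def solution(quiz):
--     ans = []
--     for q in quiz:
--         q_spl = []
--         for i in q.split():
--             try:
--                 q_spl.append(int(i))
--             except:
--                 q_spl.append(i)
--         sum = q_spl[0]
--         for i in range(1, len(q_spl), 2):
--             if q_spl[i] == "+":
--                 sum += q_spl[i+1]
--             elif q_spl[i] == "-":
--                 sum -= q_spl[i+1]
--             else:
--                 if sum == q_spl[i+1]:
--                     ans.append("O")
--                 else: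
--                     ans.append("X")
--     return ans
-- ===== SOURCE B (Python) =====
-- def _pairs(ts):
--     """Recursively chop a token list into consecutive (operator, operand) 2-tuples."""
--     return [(ts[0], ts[1])] + _pairs(ts[2:]) if ts else []
--
--
-- def solution(quiz):
--     ans = []
--     for q in quiz:
--         toks = []
--         for t in q.split():
--             try:
--                 toks.append(int(t))
--             except ValueError:
--                 toks.append(t)
--         pairs = _pairs(toks[1:])
--         # stage 1: running value just before each pair (and one final value)
--         vals = [toks[0]]
--         for op, x in pairs:
--             v = vals[-1]
--             vals.append(v + x if op == "+" else v - x if op == "-" else v)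
--         # stage 2: emit a mark at every checkpoint pair (operator not + or -)
--         ans += ["O" if v == x else "X"
--                 for (op, x), v in zip(pairs, vals)
--                 if op != "+" and op != "-"]
--     return ans
-- ===== Notes on version B (the rewrite author's own statement) =====
-- stated objective: alternative
-- what changed: Replaces A's single indexed fold over range(1,len,2) with in-loop emission by a staged pipeline: recursively chop the token tail into (operator,operand) pairs, compute the list of running values with a prefix scan, then emit the O/X marks with one filtering comprehension over zip(pairs, vals).
import Mathlib
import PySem

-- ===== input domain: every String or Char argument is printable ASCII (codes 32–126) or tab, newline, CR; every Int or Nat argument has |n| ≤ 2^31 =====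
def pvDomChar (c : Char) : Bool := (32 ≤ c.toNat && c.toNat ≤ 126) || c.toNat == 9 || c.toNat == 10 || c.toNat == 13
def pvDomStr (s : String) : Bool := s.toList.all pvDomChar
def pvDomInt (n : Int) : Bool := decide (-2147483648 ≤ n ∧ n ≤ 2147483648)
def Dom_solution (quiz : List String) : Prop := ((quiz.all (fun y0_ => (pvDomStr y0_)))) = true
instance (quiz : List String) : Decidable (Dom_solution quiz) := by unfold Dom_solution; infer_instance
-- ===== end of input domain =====

-- B replaces A's single indexed fold (with emission inside the loop) by a staged pipeline:
-- recursive pairing of the token tail, a prefix-scan of running values, then a filtering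
-- comprehension over their zip; equivalence is about the return value (no argument is mutated).

-- Shared helpers: a Python value that is either an int or a str (tokens, and the running sum).
inductive Tok where
  | i : Int → Tok
  | s : String → Tok
deriving DecidableEq, Repr

-- int(t) with the ValueError fallback to the string itself (A's try/except, B's loop over q.split())
def parseTok (t : String) : Tok :=
  match PySem.Int.ofStr? t with
  | some n => .i n
  | none => .s t

def toks (q : String) : List Tok := (PySem.Str.split₀ q).map parseTok

-- Python '+' on two ints or two strs; the fallback arm is only reached where Python raises TypeError (outside Pre_)
def addD : Tok → Tok → Tok
  | .i a, .i b => .i (a + b)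
  | .s a, .s b => .s (a ++ b)
  | a, _ => a

-- Python '-' on two ints; fallback likewise outside Pre_
def subD : Tok → Tok → Tok
  | .i a, .i b => .i (a - b)
  | a, _ => a

-- ===== PORT A =====
-- one iteration of A's 'for i in range(1, len(q_spl), 2)' body; state = (sum, ans)
def stepA (ts : List Tok) (st : Tok × List String) (idx : Int) : Tok × List String :=
  if PySem.List.pyGetD ts idx (.s "") = Tok.s "+" then
    (addD st.1 (PySem.List.pyGetD ts (idx + 1) (.s "")), st.2)
  else if PySem.List.pyGetD ts idx (.s "") = Tok.s "-" then
    (subD st.1 (PySem.List.pyGetD ts (idx + 1) (.s "")), st.2)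
  else
    (st.1, st.2 ++ [if st.1 = PySem.List.pyGetD ts (idx + 1) (.s "") then "O" else "X"])

-- A's outer-loop body for one quiz string q
def bodyA (ans : List String) (q : String) : List String :=
  ((PySem.List.pyRange 1 (PySem.List.len (toks q)) 2).foldl (stepA (toks q))
    (PySem.List.pyGetD (toks q) 0 (.s ""), ans)).2

def solution (quiz : List String) : List String := quiz.foldl bodyA []

-- ===== PORT B =====
-- B's _pairs: [(ts[0], ts[1])] + _pairs(ts[2:]) if ts else []
-- (ts[1] on a singleton raises IndexError in Python; the pyGetD default is only reached outside Pre_)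
def pairsOf : List Tok → List (Tok × Tok)
  | [] => []
  | t :: rest =>
    (t, PySem.List.pyGetD (t :: rest) 1 (.s "")) ::
      pairsOf (PySem.List.slice (t :: rest) (some 2) none)
termination_by ts => ts.length
decreasing_by
  rw [PySem.List.slice_from _ (by norm_num : (0:Int) ≤ 2)]
  simp [List.length_tail]

-- the conditional expression 'v + x if op == "+" else v - x if op == "-" else v'
def stepVal (v : Tok) (p : Tok × Tok) : Tok :=
  if p.1 = Tok.s "+" then addD v p.2 else if p.1 = Tok.s "-" then subD v p.2 else v

-- B's stage-1 loop: vals = [toks[0]]; for op, x in pairs: vals.append(step(vals[-1], (op, x)))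
def scanVals (v : Tok) : List (Tok × Tok) → List Tok
  | [] => [v]
  | p :: rest => v :: scanVals (stepVal v p) rest

-- B's per-quiz pipeline: pairs, vals, then the stage-2 filtering comprehension over zip(pairs, vals)
def marksB (ts : List Tok) : List String :=
  (List.zip (pairsOf (PySem.List.slice ts (some 1) none))
      (scanVals (PySem.List.pyGetD ts 0 (.s "")) (pairsOf (PySem.List.slice ts (some 1) none)))).filterMap
    (fun pv =>
      if pv.1.1 ≠ Tok.s "+" ∧ pv.1.1 ≠ Tok.s "-" then
        some (if pv.2 = pv.1.2 then "O" else "X")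
      else none)

def solution_alt (quiz : List String) : List String :=
  quiz.foldl (fun ans q => ans ++ marksB (toks q)) []

-- ===== PRECONDITION & SPEC =====
-- Pre_ excludes exactly the inputs on which Python A raises: a quiz whose token count is even or zero
-- (IndexError at q_spl[0] or q_spl[i+1]) or one whose '+'/'-' mixes an int with a str (TypeError).
def Pre_solution (quiz : List String) : Prop :=
  ∀ q ∈ quiz,
    (PySem.Str.split₀ q).length % 2 = 1 ∧
    ∀ k < (PySem.Str.split₀ q).length, 2 * k + 2 < (PySem.Str.split₀ q).length →
      ((PySem.Str.split₀ q).getD (2 * k + 1) "" = "+" →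
        (PySem.Int.ofStr? ((PySem.Str.split₀ q).getD (2 * k + 2) "")).isSome
          = (PySem.Int.ofStr? ((PySem.Str.split₀ q).getD 0 "")).isSome) ∧
      ((PySem.Str.split₀ q).getD (2 * k + 1) "" = "-" →
        (PySem.Int.ofStr? ((PySem.Str.split₀ q).getD 0 "")).isSome = true
          ∧ (PySem.Int.ofStr? ((PySem.Str.split₀ q).getD (2 * k + 2) "")).isSome = true)

instance (quiz : List String) : Decidable (Pre_solution quiz) := by unfold Pre_solution; infer_instance

def pvWitness_solution : List String := ["3 - 4 = -3", "5 + 6 = 11", "19 - 6 = 13"]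

def Spec_solution (quiz : List String) (out : List String) : Prop := out = solution_alt quiz
instance (quiz : List String) (out : List String) : Decidable (Spec_solution quiz out) := by unfold Spec_solution; infer_instance

-- ===== CLAIM (what is proved, stated in full; the proofs are below) =====
def Claim_equal_solution : Prop := ∀ (quiz : List String), Dom_solution quiz → Pre_solution quiz → Spec_solution quiz (solution quiz)

-- ===== LEMMAS AND PROOFS =====

-- proof-side recursion: the marks a token tail 'rest' yields when the running value is 'acc'
def evalTok : Tok → List Tok → List String
  | acc, op :: x :: rest =>
    if op = Tok.s "+" then evalTok (addD acc x) rest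
    else if op = Tok.s "-" then evalTok (subD acc x) rest
    else (if acc = x then "O" else "X") :: evalTok acc rest
  | _, _ => []

lemma pyRange_two_nil (a b : Int) (h : b ≤ a) : PySem.List.pyRange a b 2 = [] := by
  rw [PySem.List.pyRange_of_pos a b (by norm_num)]
  simp [show ¬ a < b from not_lt.mpr h]

lemma pyRange_two_cons (a b : Int) (h : a < b) :
    PySem.List.pyRange a b 2 = a :: PySem.List.pyRange (a + 2) b 2 := by
  rw [PySem.List.pyRange_of_pos a b (by norm_num), PySem.List.pyRange_of_pos (a + 2) b (by norm_num)]
  have h1 : (if a < b then ((b - a + 2 - 1) / 2).toNat else 0)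
      = (if a + 2 < b then ((b - (a + 2) + 2 - 1) / 2).toNat else 0) + 1 := by
    split_ifs <;> omega
  rw [h1, List.range_succ_eq_map, List.map_cons, List.map_map]
  refine congrArg₂ _ (by simp) (List.map_congr_left ?_)
  intro k _
  simp only [Function.comp]
  push_cast
  ring

lemma getD_append_self {α : Type} (pre : List α) (y : α) (l : List α) (d : α) :
    (pre ++ y :: l).getD pre.length d = y := by
  simp [List.getD]

lemma getD_append_succ {α : Type} (pre : List α) (y z : α) (l : List α) (d : α) :
    (pre ++ y :: z :: l).getD (pre.length + 1) d = z := by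
  simp [List.getD]

-- A's indexed fold over one quiz equals the proof-side recursion evalTok
lemma core : ∀ (rest pre : List Tok) (acc : Tok) (ans : List String), rest.length % 2 = 0 →
    ((PySem.List.pyRange (pre.length : Int) (((pre ++ rest).length : Nat) : Int) 2).foldl
      (stepA (pre ++ rest)) (acc, ans)).2 = ans ++ evalTok acc rest
  | [], pre, acc, ans, _ => by
    rw [pyRange_two_nil _ _ (by simp)]
    simp [evalTok]
  | [x], pre, acc, ans, h => by simp at h
  | op :: x :: rest, pre, acc, ans, h => by
    have hlt : (pre.length : Int) < (((pre ++ (op :: x :: rest)).length : Nat) : Int) := by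
      simp; omega
    rw [pyRange_two_cons _ _ hlt, List.foldl_cons]
    have hop : PySem.List.pyGetD (pre ++ op :: x :: rest) (pre.length : Int) (.s "") = op := by
      rw [PySem.List.pyGetD_natCast, getD_append_self]
    have hx : PySem.List.pyGetD (pre ++ op :: x :: rest) ((pre.length : Int) + 1) (.s "") = x := by
      rw [show (pre.length : Int) + 1 = ((pre.length + 1 : Nat) : Int) by push_cast; ring,
        PySem.List.pyGetD_natCast, getD_append_succ]
    have hrw : pre ++ op :: x :: rest = (pre ++ [op, x]) ++ rest := by simp
    have hlen2 : (pre.length : Int) + 2 = (((pre ++ [op, x]).length : Nat) : Int) := by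
      simp only [List.length_append, List.length_cons, List.length_nil]
      push_cast
      omega
    have hrest : rest.length % 2 = 0 := by simp at h; omega
    have hstep : stepA (pre ++ op :: x :: rest) (acc, ans) (pre.length : Int)
        = (if op = Tok.s "+" then (addD acc x, ans)
           else if op = Tok.s "-" then (subD acc x, ans)
           else (acc, ans ++ [if acc = x then "O" else "X"])) := by
      simp only [stepA, hop, hx]
    rw [hstep]
    by_cases hplus : op = Tok.s "+"
    · rw [if_pos hplus, hlen2, hrw, core rest (pre ++ [op, x]) (addD acc x) ans hrest]
      simp [evalTok, hplus]
    · by_cases hminus : op = Tok.s "-"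
      · rw [if_neg hplus, if_pos hminus, hlen2, hrw,
          core rest (pre ++ [op, x]) (subD acc x) ans hrest]
        simp [evalTok, hminus]
      · rw [if_neg hplus, if_neg hminus, hlen2, hrw,
          core rest (pre ++ [op, x]) acc (ans ++ [if acc = x then "O" else "X"]) hrest]
        simp [evalTok, hplus, hminus]

lemma pairsOf_nil : pairsOf [] = [] := by rw [pairsOf.eq_def]

lemma pairsOf_cons2 (op x : Tok) (rest : List Tok) :
    pairsOf (op :: x :: rest) = (op, x) :: pairsOf rest := by
  conv_lhs => rw [pairsOf.eq_def]
  simp only []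
  rw [PySem.List.slice_from _ (by norm_num : (0:Int) ≤ 2)]
  simp [PySem.List.pyGetD]

-- B's zip/scan/filter pipeline on a token tail equals the proof-side recursion evalTok
lemma pipeline : ∀ (rest : List Tok) (acc : Tok), rest.length % 2 = 0 →
    (List.zip (pairsOf rest) (scanVals acc (pairsOf rest))).filterMap
      (fun pv =>
        if pv.1.1 ≠ Tok.s "+" ∧ pv.1.1 ≠ Tok.s "-" then
          some (if pv.2 = pv.1.2 then "O" else "X")
        else none) = evalTok acc rest
  | [], acc, _ => by simp [pairsOf_nil, evalTok]
  | [x], acc, h => by simp at h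
  | op :: x :: rest, acc, h => by
    have hrest : rest.length % 2 = 0 := by simp at h; omega
    rw [pairsOf_cons2, scanVals, List.zip_cons_cons, List.filterMap_cons,
      pipeline rest (stepVal acc (op, x)) hrest]
    by_cases hplus : op = Tok.s "+"
    · simp [evalTok, stepVal, hplus]
    · by_cases hminus : op = Tok.s "-"
      · simp [evalTok, stepVal, hminus]
      · simp [evalTok, stepVal, hplus, hminus]

-- the two per-quiz computations agree on odd token counts
lemma per_quiz (ans : List String) (q : String) (h : (toks q).length % 2 = 1) :
    bodyA ans q = ans ++ marksB (toks q) := by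
  unfold bodyA marksB
  cases hts : toks q with
  | nil => rw [hts] at h; simp at h
  | cons t0 rest =>
    rw [hts] at h
    have heven : rest.length % 2 = 0 := by simp at h; omega
    have hc := core rest [t0] t0 ans heven
    simp only [List.singleton_append, List.length_cons, List.length_nil, Nat.zero_add] at hc
    rw [PySem.List.slice_from_one]
    simp only [PySem.List.len_eq, List.length_cons, PySem.List.pyGetD_zero_cons, List.tail_cons]
    rw [pipeline rest t0 heven]
    push_cast at hc ⊢
    exact hc

lemma top : ∀ (quiz : List String) (ans : List String), (∀ q ∈ quiz, (toks q).length % 2 = 1) →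
    quiz.foldl bodyA ans = quiz.foldl (fun ans q => ans ++ marksB (toks q)) ans
  | [], ans, _ => by simp
  | q :: qs, ans, h => by
    rw [List.foldl_cons, List.foldl_cons, per_quiz ans q (h q (by simp)),
      top qs (ans ++ marksB (toks q)) (fun r hr => h r (by simp [hr]))]

-- ===== VERDICT (by name: the statement is the Claim_ definition above) =====
theorem solution_spec : Claim_equal_solution := by
  intro quiz _ hpre
  unfold Spec_solution solution solution_alt
  exact top quiz [] (fun q hq => by simpa [toks] using (hpre q hq).1)
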